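-- pv_equiv track=rewrite | github.com/ProMeX04/DSA-PTIT | DSA06038.py | count_even_odd_pairs
-- ===== SOURCE A (Python) =====
-- def count_even_odd_pairs(A):
--     even_count = 0
--     odd_between_count = 0
--     pair_count = 0
--
--     for i in range(len(A)):
--         if A[i] % 2 == 0:  # Nếu A[i] là số chẵn
--             even_count += 1
--             odd_between_count = 0  # Reset đếm số lẻ khi gặp số chẵn mới
--         else:
--             odd_between_count += even_count  # Cập nhật số lẻ nằm giữa các số chẵn
--
--         for j in range(i+1, len(A)):
--             if A[j] % 2 == 0 and A[i] > A[j]: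
--                 pair_count += odd_between_count  # Đếm cặp thỏa mãn điều kiện
--
--     return pair_count
-- ===== SOURCE B (Python) =====
-- def count_even_odd_pairs(A):
--     n = len(A)
--     # forward pass: weight (odd_between_count after step i) for each position
--     weights = []
--     even_count = 0
--     odd_between = 0
--     for x in A:
--         if x % 2 == 0:
--             even_count += 1
--             odd_between = 0
--         else:
--             odd_between += even_count
--         weights.append(odd_between)
--     # backward pass: sorted list of evens seen to the right; binary search
--     # (hand-written bisect_left, as the module imports nothing) gives the
--     # number of later evens smaller than A[i] in O(log n).
--     total = 0
--     evens = []
--     for i in range(n - 1, -1, -1):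
--         x = A[i]
--         lo = 0
--         hi = len(evens)
--         while lo < hi:
--             mid = (lo + hi) // 2
--             if evens[mid] < x:
--                 lo = mid + 1
--             else:
--                 hi = mid
--         total += weights[i] * lo
--         if x % 2 == 0:
--             evens.insert(lo, x)
--     return total
-- ===== Notes on version B (the rewrite author's own statement) =====
-- stated objective: faster
-- what changed: Replaces the O(n^2) double loop by a forward pass that precomputes the odd_between weight for each index and a backward pass that keeps the later even values in a sorted list, getting the count of later smaller evens by a hand-written binary search and multiplying it by the weight.
import Mathlib
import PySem

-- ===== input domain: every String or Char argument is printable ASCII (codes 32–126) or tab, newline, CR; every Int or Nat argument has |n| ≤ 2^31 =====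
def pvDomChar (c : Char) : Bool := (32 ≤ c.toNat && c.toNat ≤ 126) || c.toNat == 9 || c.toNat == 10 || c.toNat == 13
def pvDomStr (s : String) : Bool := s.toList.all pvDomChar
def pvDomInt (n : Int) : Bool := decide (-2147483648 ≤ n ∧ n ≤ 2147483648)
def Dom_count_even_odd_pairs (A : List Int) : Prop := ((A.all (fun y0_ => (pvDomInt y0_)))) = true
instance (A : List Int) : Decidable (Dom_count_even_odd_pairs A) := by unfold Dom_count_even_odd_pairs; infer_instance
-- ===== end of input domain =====

-- B replaces A's O(n^2) double loop by a forward weight pass plus a backward pass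
-- over a sorted list of later evens queried by hand-written binary search (faster).


-- ===== PORT A =====
def count_even_odd_pairs (A : List Int) : Int :=
  ((PySem.List.pyRange 0 (A.length : Int) 1).foldl (fun (st : Int × Int × Int) i =>
    let ai := PySem.List.pyGetD A i 0
    let p := if PySem.Int.mod ai 2 = 0 then (st.1 + 1, (0 : Int)) else (st.1, st.2.1 + st.1)
    let pc := (PySem.List.pyRange (i + 1) (A.length : Int) 1).foldl (fun pc j =>
      let aj := PySem.List.pyGetD A j 0
      if PySem.Int.mod aj 2 = 0 ∧ ai > aj then pc + p.2 else pc) st.2.2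
    (p.1, p.2, pc)) ((0 : Int), (0 : Int), (0 : Int))).2.2

-- ===== PORT B =====
-- hand-written bisect_left of Source B (the while loop, transliterated as recursion on hi - lo)
def pvBisect (evens : List Int) (x : Int) (lo hi : Int) : Int :=
  if h : lo < hi then
    let mid := PySem.Int.floordiv (lo + hi) 2
    if PySem.List.pyGetD evens mid 0 < x then pvBisect evens x (mid + 1) hi
    else pvBisect evens x lo mid
  else lo
termination_by (hi - lo).toNat
decreasing_by
  · have hb := PySem.Int.floordiv_two_mid_bounds (lo := lo) (hi := hi) (le_of_lt h)
    have hlt : PySem.Int.floordiv (lo + hi) 2 < hi := by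
      rw [PySem.Int.floordiv_lt_iff_lt_mul (by norm_num)]; omega
    omega
  · have hlt : PySem.Int.floordiv (lo + hi) 2 < hi := by
      rw [PySem.Int.floordiv_lt_iff_lt_mul (by norm_num)]; omega
    omega

def count_even_odd_pairs_alt (A : List Int) : Int :=
  let w := A.foldl (fun (st : Int × Int × List Int) x =>
      let p := if PySem.Int.mod x 2 = 0 then (st.1 + 1, (0 : Int)) else (st.1, st.2.1 + st.1)
      (p.1, p.2, st.2.2 ++ [p.2])) ((0 : Int), (0 : Int), ([] : List Int))
  let weights := w.2.2
  ((PySem.List.pyRange ((A.length : Int) - 1) (-1) (-1)).foldl (fun (st : Int × List Int) i =>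
      let x := PySem.List.pyGetD A i 0
      let lo := pvBisect st.2 x 0 (st.2.length : Int)
      (st.1 + PySem.List.pyGetD weights i 0 * lo,
       if PySem.Int.mod x 2 = 0 then PySem.List.insert st.2 lo x else st.2)) ((0 : Int), ([] : List Int))).1

-- ===== PRECONDITION & SPEC =====
def Spec_count_even_odd_pairs (A : List Int) (out : Int) : Prop := out = count_even_odd_pairs_alt A
instance (A : List Int) (out : Int) : Decidable (Spec_count_even_odd_pairs A out) := by unfold Spec_count_even_odd_pairs; infer_instance

-- ===== CLAIM (what is proved, stated in full; the proofs are below) =====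
def Claim_equal_count_even_odd_pairs : Prop := ∀ (A : List Int), Dom_count_even_odd_pairs A → Spec_count_even_odd_pairs A (count_even_odd_pairs A)

-- ===== LEMMAS AND PROOFS =====

-- the (even_count, odd_between) update of both programs
def pvStep (ec ob x : Int) : Int × Int :=
  if PySem.Int.mod x 2 = 0 then (ec + 1, 0) else (ec, ob + ec)

-- the weight list Source B builds in its forward pass, from a given state
def pvW (ec ob : Int) : List Int → List Int
  | [] => []
  | x :: r => (pvStep ec ob x).2 :: pvW (pvStep ec ob x).1 (pvStep ec ob x).2 r

def pvEvens (l : List Int) : List Int := l.filter (fun y => decide (PySem.Int.mod y 2 = 0))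

def pvCntLess (x : Int) (l : List Int) : Int := (l.countP (fun y => decide (y < x)) : Int)

-- common specification: Σ over positions of weight * #(later evens (plus E) smaller than the element)
def pvSext : List (Int × Int) → List Int → Int
  | [], _ => 0
  | (x, w) :: r, E => w * pvCntLess x (pvEvens (r.map Prod.fst) ++ E) + pvSext r E

-- structural form of A's outer loop
def pvCnt (x : Int) (l : List Int) : Int :=
  (l.countP (fun y => decide (PySem.Int.mod y 2 = 0) && decide (y < x)) : Int)

def pvLoopA : (Int × Int × Int) → List Int → (Int × Int × Int)
  | st, [] => st
  | st, x :: r =>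
    pvLoopA ((pvStep st.1 st.2.1 x).1, (pvStep st.1 st.2.1 x).2,
             st.2.2 + (pvStep st.1 st.2.1 x).2 * pvCnt x r) r

-- A's inner loop counts matches, adding p.2 each time
lemma pvInner (x ob : Int) : ∀ (l : List Int) (pc : Int),
    l.foldl (fun pc y => if PySem.Int.mod y 2 = 0 ∧ x > y then pc + ob else pc) pc
      = pc + ob * pvCnt x l := by
  intro l
  induction l with
  | nil => intro pc; simp [pvCnt]
  | cons y r ih =>
    intro pc
    simp only [List.foldl_cons]
    rw [ih]
    by_cases hy : PySem.Int.mod y 2 = 0 ∧ x > y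
    · have hb : (decide (PySem.Int.mod y 2 = 0) && decide (y < x)) = true := by
        rw [decide_eq_true hy.1, decide_eq_true hy.2]; rfl
      simp only [if_pos hy, pvCnt, List.countP_cons, hb]
      push_cast; ring
    · have hb : (decide (PySem.Int.mod y 2 = 0) && decide (y < x)) = false := by
        rcases not_and_or.mp hy with h | h
        · rw [decide_eq_false h]; rfl
        · rw [decide_eq_false (show ¬ y < x from h)]; simp
      simp only [if_neg hy, pvCnt, List.countP_cons, hb]
      simp

-- bridge: A's indexed outer fold is the structural loop on the suffix
lemma pvABridge (A : List Int) : ∀ (m k : Nat), k + m = A.length → ∀ (st : Int × Int × Int),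
    (PySem.List.pyRange (k : Int) (A.length : Int) 1).foldl (fun (st : Int × Int × Int) i =>
      let ai := PySem.List.pyGetD A i 0
      let p := if PySem.Int.mod ai 2 = 0 then (st.1 + 1, (0 : Int)) else (st.1, st.2.1 + st.1)
      let pc := (PySem.List.pyRange (i + 1) (A.length : Int) 1).foldl (fun pc j =>
        let aj := PySem.List.pyGetD A j 0
        if PySem.Int.mod aj 2 = 0 ∧ ai > aj then pc + p.2 else pc) st.2.2
      (p.1, p.2, pc)) st = pvLoopA st (A.drop k) := by
  intro m
  induction m with
  | zero =>
    intro k hk st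
    rw [PySem.List.pyRange_one_eq_nil (by exact_mod_cast (show A.length ≤ k by omega))]
    rw [List.drop_eq_nil_of_le (by omega)]
    rfl
  | succ m ih =>
    intro k hk st
    have hklt : k < A.length := by omega
    have hkc : ((k : Int)) < (A.length : Int) := by exact_mod_cast hklt
    rw [PySem.List.pyRange_one_cons hkc]
    simp only [List.foldl_cons]
    have hcast : ((k : Int) + 1) = (((k + 1 : Nat)) : Int) := by push_cast; ring
    rw [hcast, ih (k + 1) (by omega)]
    rw [List.drop_eq_getElem_cons hklt]
    have hai : PySem.List.pyGetD A ((k : Nat) : Int) 0 = A[k] := by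
      simp [PySem.List.pyGetD_natCast, hklt]
    simp only [pvLoopA, hai]
    simp only [pvStep]
    have hfold : ∀ ob : Int, List.foldl
        (fun pc j =>
          if PySem.Int.mod (PySem.List.pyGetD A j 0) 2 = 0 ∧ A[k] > PySem.List.pyGetD A j 0 then
            pc + ob else pc)
        st.2.2 (PySem.List.pyRange ((k + 1 : Nat) : Int) (A.length : Int))
        = st.2.2 + ob * pvCnt A[k] (List.drop (k + 1) A) := by
      intro ob
      rw [PySem.List.foldl_pyRange_pyGetD' A 0
        (fun pc y => if PySem.Int.mod y 2 = 0 ∧ A[k] > y then pc + ob else pc) st.2.2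
        (by positivity)]
      simp only [Int.toNat_natCast]
      exact pvInner A[k] ob (List.drop (k + 1) A) st.2.2
    rw [hfold]

lemma pvW_length (l : List Int) : ∀ ec ob, (pvW ec ob l).length = l.length := by
  induction l with
  | nil => intro ec ob; rfl
  | cons x r ih => intro ec ob; simp [pvW, ih]

lemma pvCnt_eq (x : Int) (r : List Int) : pvCntLess x (pvEvens r) = pvCnt x r := by
  unfold pvCntLess pvEvens pvCnt
  rw [List.countP_filter]
  have h : (fun y => decide (y < x) && decide (PySem.Int.mod y 2 = 0))
      = (fun y : Int => decide (PySem.Int.mod y 2 = 0) && decide (y < x)) := by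
    funext y; rw [Bool.and_comm]
  rw [h]

-- A's structural loop computes the common specification
lemma pvA_spec (l : List Int) : ∀ ec ob pc,
    (pvLoopA (ec, ob, pc) l).2.2 = pc + pvSext (l.zip (pvW ec ob l)) [] := by
  induction l with
  | nil => intro ec ob pc; simp [pvLoopA, pvSext]
  | cons x r ih =>
    intro ec ob pc
    simp only [pvLoopA, pvW, List.zip_cons_cons, pvSext]
    rw [ih]
    rw [List.map_fst_zip (le_of_eq (pvW_length r _ _).symm)]
    rw [List.append_nil, pvCnt_eq]
    ring

-- B's forward pass builds pvW
lemma pvWeights (l : List Int) : ∀ (ec ob : Int) (acc : List Int),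
    (l.foldl (fun (st : Int × Int × List Int) x =>
      let p := if PySem.Int.mod x 2 = 0 then (st.1 + 1, (0 : Int)) else (st.1, st.2.1 + st.1)
      (p.1, p.2, st.2.2 ++ [p.2])) (ec, ob, acc)).2.2 = acc ++ pvW ec ob l := by
  induction l with
  | nil => intro ec ob acc; simp [pvW]
  | cons x r ih =>
    intro ec ob acc
    simp only [List.foldl_cons]
    by_cases hx : PySem.Int.mod x 2 = 0
    · rw [show (if PySem.Int.mod x 2 = 0 then (ec + 1, (0 : Int)) else (ec, ob + ec)) = (ec + 1, (0:Int)) from if_pos hx]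
      simp only [ih, pvW, pvStep, if_pos hx, List.append_assoc, List.singleton_append]
    · rw [show (if PySem.Int.mod x 2 = 0 then (ec + 1, (0 : Int)) else (ec, ob + ec)) = (ec, ob + ec) from if_neg hx]
      simp only [ih, pvW, pvStep, if_neg hx, List.append_assoc, List.singleton_append]

-- positions below countP (· < x) are exactly the elements < x, in a sorted list
lemma pvSortedIff (x : Int) : ∀ (E : List Int), E.Pairwise (· ≤ ·) →
    ∀ (k : Nat) (hk : k < E.length), E[k] < x ↔ k < E.countP (fun y => decide (y < x)) := by
  intro E
  induction E with
  | nil => intro _ k hk; simp at hk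
  | cons a r ih =>
    intro hE k hk
    obtain ⟨ha, hr⟩ := List.pairwise_cons.mp hE
    by_cases hax : a < x
    · have hc : (a :: r).countP (fun y => decide (y < x))
          = r.countP (fun y => decide (y < x)) + 1 := by
        rw [List.countP_cons, decide_eq_true hax]; simp
      cases k with
      | zero => simpa [hc] using hax
      | succ k =>
        have hk' : k < r.length := by simpa using hk
        rw [List.getElem_cons_succ, hc]
        rw [ih hr k hk']
        omega
    · have hnone : ∀ b ∈ r, ¬ b < x := fun b hb hbx => hax (lt_of_le_of_lt (ha b hb) hbx)
      have hc0 : r.countP (fun y => decide (y < x)) = 0 :=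
        List.countP_eq_zero.mpr (fun b hb => by rw [decide_eq_false (hnone b hb)]; simp)
      have hc : (a :: r).countP (fun y => decide (y < x)) = 0 := by
        rw [List.countP_cons, decide_eq_false hax, hc0]; simp
      rw [hc]
      cases k with
      | zero => simpa using hax
      | succ k =>
        have hk' : k < r.length := by simpa using hk
        rw [List.getElem_cons_succ]
        simp only [Nat.not_lt_zero, iff_false]
        exact hnone r[k] (List.getElem_mem hk')

-- the binary search returns countP (· < x) on a sorted list
lemma pvBisect_bounds (E : List Int) (x : Int) (hE : E.Pairwise (· ≤ ·)) :
    ∀ (n : Nat) (lo hi : Int), (hi - lo).toNat = n → 0 ≤ lo → lo ≤ hi → hi ≤ (E.length : Int) →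
    (∀ k : Nat, k < lo.toNat → ∀ hk : k < E.length, E[k] < x) →
    (∀ k : Nat, hi.toNat ≤ k → ∀ hk : k < E.length, ¬ E[k] < x) →
    pvBisect E x lo hi = ((E.countP fun y => decide (y < x) : Nat) : Int) := by
  have hpw := List.pairwise_iff_getElem.mp hE
  intro n
  induction n using Nat.strong_induction_on with
  | _ n IH =>
    intro lo hi hn h0 hlohi hhil hbelow habove
    rw [pvBisect]
    by_cases h : lo < hi
    · rw [dif_pos h]
      simp only []
      have hb := PySem.Int.floordiv_two_mid_bounds (le_of_lt h)
      have hmidlt : PySem.Int.floordiv (lo + hi) 2 < hi := by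
        rw [PySem.Int.floordiv_lt_iff_lt_mul (by norm_num)]; omega
      set mid := PySem.Int.floordiv (lo + hi) 2 with hmid
      have hmem : mid < (E.length : Int) := lt_of_lt_of_le hmidlt hhil
      have h0m : 0 ≤ mid := le_trans h0 hb.1
      have hmt : mid.toNat < E.length := by omega
      rw [PySem.List.pyGetD_eq_getElem E 0 h0m (by omega)]
      by_cases hcmp : E[mid.toNat] < x
      · rw [if_pos hcmp]
        refine IH (hi - (mid + 1)).toNat (by omega) (mid + 1) hi rfl (by omega) (by omega) hhil ?_ habove
        intro k hklt hk
        rcases lt_or_eq_of_le (Nat.lt_succ_iff.mp (by omega : k < mid.toNat + 1)) with hlt | heq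
        · exact lt_of_le_of_lt (hpw k mid.toNat hk hmt hlt) hcmp
        · subst heq; exact hcmp
      · rw [if_neg hcmp]
        refine IH (mid - lo).toNat (by omega) lo mid rfl h0 hb.1 (le_of_lt hmem) hbelow ?_
        intro k hk hklen
        rcases lt_or_eq_of_le (by omega : mid.toNat ≤ k) with hlt | heq
        · exact fun hkx => hcmp (lt_of_le_of_lt (hpw mid.toNat k hmt hklen hlt) hkx)
        · subst heq; exact hcmp
    · rw [dif_neg h]
      have hc : lo.toNat = E.countP (fun y => decide (y < x)) := by
        have hcle : E.countP (fun y => decide (y < x)) ≤ E.length := List.countP_le_length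
        by_contra hne
        rcases Nat.lt_or_ge lo.toNat (E.countP (fun y => decide (y < x))) with hlt | hge
        · have hklen : lo.toNat < E.length := lt_of_lt_of_le hlt hcle
          exact habove lo.toNat (by omega) hklen ((pvSortedIff x E hE lo.toNat hklen).mpr hlt)
        · have hgt : E.countP (fun y => decide (y < x)) < lo.toNat := by omega
          have hclen : E.countP (fun y => decide (y < x)) < E.length := by omega
          have := (pvSortedIff x E hE _ hclen).mp (hbelow _ (by omega) hclen)
          omega
      omega

lemma pvBisect_spec (E : List Int) (x : Int) (hE : E.Pairwise (· ≤ ·)) :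
    pvBisect E x 0 (E.length : Int) = pvCntLess x E := by
  exact pvBisect_bounds E x hE _ 0 (E.length : Int) rfl le_rfl (by positivity) le_rfl
    (by omega) (fun k hk hklen => by omega)

-- inserting at the bisect position keeps the list sorted, and is a cons up to permutation
lemma pvInsert_spec (E : List Int) (x : Int) (hE : E.Pairwise (· ≤ ·)) :
    (PySem.List.insert E (pvCntLess x E) x).Pairwise (· ≤ ·) ∧
    (PySem.List.insert E (pvCntLess x E) x).Perm (x :: E) := by
  have hm : E.countP (fun y => decide (y < x)) ≤ E.length := List.countP_le_length
  rw [pvCntLess, PySem.List.insert_natCast E _ x hm]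
  set m := E.countP (fun y => decide (y < x)) with hmdef
  have htake : ∀ a ∈ E.take m, a < x := by
    intro a hain
    obtain ⟨i, hi, hia⟩ := List.mem_iff_getElem.mp hain
    have hilen : i < E.length := (by simpa using hi : i < m ∧ i < E.length).2
    have him : i < m := (by simpa using hi : i < m ∧ i < E.length).1
    have : (E.take m)[i] = E[i] := List.getElem_take
    rw [← hia, this]
    exact (pvSortedIff x E hE i hilen).mpr him
  have hdrop : ∀ b ∈ E.drop m, x ≤ b := by
    intro b hbin
    obtain ⟨j, hj, hjb⟩ := List.mem_iff_getElem.mp hbin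
    have hjlen : m + j < E.length := by
      have := List.length_drop (l := E) (i := m); omega
    have : (E.drop m)[j] = E[m + j] := List.getElem_drop
    rw [← hjb, this]
    have : ¬ E[m + j] < x := fun hlt =>
      absurd ((pvSortedIff x E hE (m + j) hjlen).mp hlt) (by omega)
    omega
  constructor
  · rw [List.pairwise_append]
    refine ⟨hE.sublist (List.take_sublist m E), ?_, ?_⟩
    · rw [List.pairwise_cons]
      exact ⟨hdrop, hE.sublist (List.drop_sublist m E)⟩
    · intro a ha b hb
      rcases List.mem_cons.mp hb with rfl | hb
      · exact le_of_lt (htake a ha)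
      · exact le_trans (le_of_lt (htake a ha)) (hdrop b hb)
  · calc (E.take m ++ x :: E.drop m).Perm (x :: (E.take m ++ E.drop m)) := List.perm_middle
      _ = (x :: E) := by rw [List.take_append_drop]

-- B's backward pass invariant
lemma pvBLoop (g : (Int × List Int) → (Int × Int) → (Int × List Int))
    (hg : g = fun st p => (st.1 + p.2 * pvBisect st.2 p.1 0 (st.2.length : Int),
       if PySem.Int.mod p.1 2 = 0 then PySem.List.insert st.2 (pvBisect st.2 p.1 0 (st.2.length : Int)) p.1 else st.2)) :
    ∀ (pz : List (Int × Int)) (t : Int) (E : List Int), E.Pairwise (· ≤ ·) →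
    (pz.reverse.foldl g (t, E)).1 = t + pvSext pz E ∧
    (pz.reverse.foldl g (t, E)).2.Pairwise (· ≤ ·) ∧
    (pz.reverse.foldl g (t, E)).2.Perm (pvEvens (pz.map Prod.fst) ++ E) := by
  intro pz
  induction pz with
  | nil => intro t E hE; exact ⟨by simp [pvSext], hE, by simp [pvEvens]⟩
  | cons a r ih =>
    obtain ⟨xa, wa⟩ := a
    intro t E hE
    obtain ⟨h1, h2, h3⟩ := ih t E hE
    rw [List.reverse_cons, List.foldl_append]
    set P := r.reverse.foldl g (t, E) with hP
    have hbis : pvBisect P.2 xa 0 (P.2.length : Int)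
        = pvCntLess xa (pvEvens (r.map Prod.fst) ++ E) := by
      rw [pvBisect_spec P.2 xa h2]
      unfold pvCntLess
      rw [h3.countP_eq]
    have hcnt : pvCntLess xa (pvEvens (r.map Prod.fst) ++ E) = pvCntLess xa P.2 := by
      unfold pvCntLess; rw [h3.countP_eq]
    have hstep : List.foldl g P [(xa, wa)] = g P (xa, wa) := rfl
    rw [hstep, hg]
    refine ⟨?_, ?_, ?_⟩
    · simp only []
      rw [h1, hbis, pvSext]
      ring
    · simp only []
      by_cases hxa : PySem.Int.mod xa 2 = 0
      · rw [if_pos hxa, hbis, hcnt]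
        exact (pvInsert_spec P.2 xa h2).1
      · rw [if_neg hxa]; exact h2
    · simp only []
      by_cases hxa : PySem.Int.mod xa 2 = 0
      · rw [if_pos hxa, hbis, hcnt]
        refine ((pvInsert_spec P.2 xa h2).2.trans (h3.cons xa)).trans ?_
        have : pvEvens (((xa, wa) :: r).map Prod.fst) = xa :: pvEvens (r.map Prod.fst) := by
          simp only [List.map_cons]
          unfold pvEvens
          rw [List.filter_cons_of_pos (by rw [decide_eq_true hxa])]
        rw [this]
        exact List.Perm.refl _
      · rw [if_neg hxa]
        refine h3.trans ?_
        have : pvEvens (((xa, wa) :: r).map Prod.fst) = pvEvens (r.map Prod.fst) := by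
          simp only [List.map_cons]
          unfold pvEvens
          rw [List.filter_cons_of_neg (by rw [decide_eq_false hxa]; simp)]
        rw [this]

-- the backward indexed fold walks the reversed zip of A with its weights
lemma pvBBridge (A ws : List Int) (hlen : ws.length = A.length)
    (g : (Int × List Int) → (Int × Int) → (Int × List Int))
    (hg : g = fun st p => (st.1 + p.2 * pvBisect st.2 p.1 0 (st.2.length : Int),
       if PySem.Int.mod p.1 2 = 0 then PySem.List.insert st.2 (pvBisect st.2 p.1 0 (st.2.length : Int)) p.1 else st.2)) :
    (PySem.List.pyRange ((A.length : Int) - 1) (-1) (-1)).foldl (fun (st : Int × List Int) i =>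
      let x := PySem.List.pyGetD A i 0
      let lo := pvBisect st.2 x 0 (st.2.length : Int)
      (st.1 + PySem.List.pyGetD ws i 0 * lo,
       if PySem.Int.mod x 2 = 0 then PySem.List.insert st.2 lo x else st.2)) ((0 : Int), ([] : List Int))
    = (A.zip ws).reverse.foldl g ((0 : Int), ([] : List Int)) := by
  rw [PySem.List.pyRange_neg_one_eq_reverse, show ((-1 : Int) + 1) = 0 from rfl,
    show (A.length : Int) - 1 + 1 = (A.length : Int) by ring]
  have hmap : (PySem.List.pyRange 0 (A.length : Int)).map
      (fun i => (PySem.List.pyGetD A i 0, PySem.List.pyGetD ws i 0)) = A.zip ws := by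
    apply List.ext_getElem
    · simp [PySem.List.length_pyRange_one, hlen]
    · intro k h1 h2
      have hk : k < A.length := by
        simpa [PySem.List.length_pyRange_one] using h1
      rw [List.getElem_map, PySem.List.getElem_pyRange_one, List.getElem_zip]
      have hz : (0 : Int) + (k : Int) = ((k : Nat) : Int) := by ring
      rw [hz, PySem.List.pyGetD_natCast, PySem.List.pyGetD_natCast,
        List.getD_eq_getElem A 0 hk, List.getD_eq_getElem ws 0 (by omega)]
  rw [← hmap, ← List.map_reverse, List.foldl_map, hg]

-- ===== VERDICT (by name: the statement is the Claim_ definition above) =====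
theorem count_even_odd_pairs_spec : Claim_equal_count_even_odd_pairs := by
  intro A _
  unfold Spec_count_even_odd_pairs
  have hA : count_even_odd_pairs A = (pvLoopA (0, 0, 0) A).2.2 := by
    unfold count_even_odd_pairs
    have h := pvABridge A A.length 0 (by omega) (0, 0, 0)
    simp only [Nat.cast_zero] at h
    rw [h, List.drop_zero]
  have hB : count_even_odd_pairs_alt A
      = ((A.zip (pvW 0 0 A)).reverse.foldl
          (fun (st : Int × List Int) (p : Int × Int) =>
            (st.1 + p.2 * pvBisect st.2 p.1 0 (st.2.length : Int),
             if PySem.Int.mod p.1 2 = 0 then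
               PySem.List.insert st.2 (pvBisect st.2 p.1 0 (st.2.length : Int)) p.1
             else st.2)) ((0 : Int), ([] : List Int))).1 := by
    unfold count_even_odd_pairs_alt
    simp only []
    rw [pvWeights A 0 0 [], List.nil_append]
    rw [pvBBridge A (pvW 0 0 A) (pvW_length A 0 0) _ rfl]
  rw [hA, hB, pvA_spec A 0 0 0]
  rw [(pvBLoop _ rfl (A.zip (pvW 0 0 A)) 0 [] List.Pairwise.nil).1]
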